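-- pv_equiv track=rewrite | github.com/daviserra-code/rag-suite | packages/diagnostics/prompt_templates.py | format_loss_context
-- ===== SOURCE A (Python) =====
-- def format_loss_context(semantic_signals: dict, scope: str) -> str:
--     """Extract and format loss_category information from semantic signals."""
--     if not semantic_signals or not semantic_signals.get('semantic_signals'):
--         return "No semantic signals available.\nLoss category: unknown"
--
--     signals = semantic_signals.get('semantic_signals', [])
--     loss_categories = []
--
--     for signal in signals:
--         if signal.get('loss_category'):
--             loss_categories.append({
--                 'signal_id': signal['semantic_id'],
--                 'value': signal['value'],
--                 'category': signal['loss_category']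
--             })
--
--     if not loss_categories:
--         return "No active loss categories detected.\nAll signals within normal operating parameters."
--
--     formatted = "Active Loss Categories:\n"
--     for loss in loss_categories:
--         formatted += f"  - {loss['signal_id']}: {loss['value']} → {loss['category']}\n"
--
--     # Categorize by OEE pillar
--     availability_losses = [l for l in loss_categories if l['category'].startswith('availability.')]
--     performance_losses = [l for l in loss_categories if l['category'].startswith('performance.')]
--     quality_losses = [l for l in loss_categories if l['category'].startswith('quality.')]
--
--     formatted += "\nImpacted OEE Pillars:\n"
--     if availability_losses:
--         formatted += f"  - Availability: {len(availability_losses)} signal(s)\n"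
--     if performance_losses:
--         formatted += f"  - Performance: {len(performance_losses)} signal(s)\n"
--     if quality_losses:
--         formatted += f"  - Quality: {len(quality_losses)} signal(s)\n"
--
--     return formatted
-- ===== SOURCE B (Python) =====
-- def format_loss_context(semantic_signals: dict, scope: str) -> str:
--     """Single accumulating pass: collect detail lines and pillar counters together."""
--     if not semantic_signals or not semantic_signals.get('semantic_signals'):
--         return "No semantic signals available.\nLoss category: unknown"
--     lines = []
--     avail = perf = qual = 0
--     for sig in semantic_signals['semantic_signals']:
--         category = sig.get('loss_category')
--         if not category:
--             continue
--         lines.append(f"  - {sig['semantic_id']}: {sig['value']} \u2192 {category}\n")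
--         if category.startswith('availability.'):
--             avail += 1
--         if category.startswith('performance.'):
--             perf += 1
--         if category.startswith('quality.'):
--             qual += 1
--     if not lines:
--         return "No active loss categories detected.\nAll signals within normal operating parameters."
--     out = "Active Loss Categories:\n" + "".join(lines) + "\nImpacted OEE Pillars:\n"
--     if avail:
--         out += f"  - Availability: {avail} signal(s)\n"
--     if perf:
--         out += f"  - Performance: {perf} signal(s)\n"
--     if qual:
--         out += f"  - Quality: {qual} signal(s)\n"
--     return out
-- ===== Notes on version B (the rewrite author's own statement) =====
-- stated objective: simpler
-- what changed: B replaces A's intermediate list of loss dicts plus three separate filtering passes (and a second formatting loop) with one accumulating pass that collects the detail lines and the three pillar counters together, then joins them.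
import Mathlib
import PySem

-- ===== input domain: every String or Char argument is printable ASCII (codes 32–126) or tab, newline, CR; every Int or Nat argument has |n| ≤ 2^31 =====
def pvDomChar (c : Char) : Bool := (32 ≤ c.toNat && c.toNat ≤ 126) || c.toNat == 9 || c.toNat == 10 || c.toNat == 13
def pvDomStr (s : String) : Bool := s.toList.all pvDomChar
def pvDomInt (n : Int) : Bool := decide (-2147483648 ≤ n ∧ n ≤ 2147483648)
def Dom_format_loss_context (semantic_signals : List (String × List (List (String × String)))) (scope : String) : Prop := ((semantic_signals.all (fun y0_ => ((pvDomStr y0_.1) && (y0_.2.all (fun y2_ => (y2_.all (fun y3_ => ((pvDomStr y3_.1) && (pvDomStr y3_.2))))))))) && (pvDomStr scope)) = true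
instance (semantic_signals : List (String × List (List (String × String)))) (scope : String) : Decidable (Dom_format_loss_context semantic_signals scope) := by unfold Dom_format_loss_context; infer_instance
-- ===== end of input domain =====

-- B: one accumulating pass collecting the detail lines and the three pillar counters together,
-- instead of A's intermediate list of loss records plus three filtering passes (objective: simpler).

-- ===== PORT A =====
def format_loss_context (semantic_signals : List (String × List (List (String × String)))) (scope : String) : String :=
  if semantic_signals.isEmpty || ((List.lookup "semantic_signals" semantic_signals).getD []).isEmpty then
    "No semantic signals available.\nLoss category: unknown"
  else
    let signals := (List.lookup "semantic_signals" semantic_signals).getD []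
    -- signal['semantic_id'] / signal['value'] raise KeyError when the key is missing; Pre_ excludes
    -- those inputs, so .getD "" is only ever evaluated where the key is present.
    let loss_categories := signals.foldl (fun acc signal =>
      if ((List.lookup "loss_category" signal).getD "") != "" then
        acc ++ [((List.lookup "semantic_id" signal).getD "",
                 (List.lookup "value" signal).getD "",
                 (List.lookup "loss_category" signal).getD "")]
      else acc) []
    if loss_categories.isEmpty then
      "No active loss categories detected.\nAll signals within normal operating parameters."
    else
      let formatted := loss_categories.foldl (fun f l =>
        f ++ ("  - " ++ l.1 ++ ": " ++ l.2.1 ++ " → " ++ l.2.2 ++ "\n")) "Active Loss Categories:\n"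
      let availability_losses := loss_categories.filter (fun l => PySem.Str.startswith l.2.2 "availability.")
      let performance_losses := loss_categories.filter (fun l => PySem.Str.startswith l.2.2 "performance.")
      let quality_losses := loss_categories.filter (fun l => PySem.Str.startswith l.2.2 "quality.")
      let formatted := formatted ++ "\nImpacted OEE Pillars:\n"
      let formatted := if !availability_losses.isEmpty then
        formatted ++ ("  - Availability: " ++ PySem.Int.toStr (availability_losses.length : Int) ++ " signal(s)\n") else formatted
      let formatted := if !performance_losses.isEmpty then
        formatted ++ ("  - Performance: " ++ PySem.Int.toStr (performance_losses.length : Int) ++ " signal(s)\n") else formatted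
      let formatted := if !quality_losses.isEmpty then
        formatted ++ ("  - Quality: " ++ PySem.Int.toStr (quality_losses.length : Int) ++ " signal(s)\n") else formatted
      formatted

-- ===== PORT B =====
def format_loss_context_alt (semantic_signals : List (String × List (List (String × String)))) (scope : String) : String :=
  if semantic_signals.isEmpty || ((List.lookup "semantic_signals" semantic_signals).getD []).isEmpty then
    "No semantic signals available.\nLoss category: unknown"
  else
    let st := ((List.lookup "semantic_signals" semantic_signals).getD []).foldl
      (fun (st : List String × Int × Int × Int) signal =>
        let category := (List.lookup "loss_category" signal).getD ""
        if category == "" then st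
        else
          let lines := st.1 ++ ["  - " ++ (List.lookup "semantic_id" signal).getD "" ++ ": " ++
                                (List.lookup "value" signal).getD "" ++ " → " ++ category ++ "\n"]
          let a := if PySem.Str.startswith category "availability." then st.2.1 + 1 else st.2.1
          let p := if PySem.Str.startswith category "performance." then st.2.2.1 + 1 else st.2.2.1
          let q := if PySem.Str.startswith category "quality." then st.2.2.2 + 1 else st.2.2.2
          (lines, a, p, q))
      ([], 0, 0, 0)
    if st.1.isEmpty then
      "No active loss categories detected.\nAll signals within normal operating parameters."
    else
      let out := "Active Loss Categories:\n" ++ PySem.Str.join "" st.1 ++ "\nImpacted OEE Pillars:\n"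
      let out := if st.2.1 != 0 then out ++ ("  - Availability: " ++ PySem.Int.toStr st.2.1 ++ " signal(s)\n") else out
      let out := if st.2.2.1 != 0 then out ++ ("  - Performance: " ++ PySem.Int.toStr st.2.2.1 ++ " signal(s)\n") else out
      let out := if st.2.2.2 != 0 then out ++ ("  - Quality: " ++ PySem.Int.toStr st.2.2.2 ++ " signal(s)\n") else out
      out

-- ===== PRECONDITION & SPEC =====
-- Pre_ excludes exactly the inputs on which A (and B) raise KeyError: a signal whose
-- 'loss_category' is truthy but which lacks the key 'semantic_id' or 'value'.
def Pre_format_loss_context (semantic_signals : List (String × List (List (String × String)))) (scope : String) : Prop :=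
  (((List.lookup "semantic_signals" semantic_signals).getD []).all (fun signal =>
    (((List.lookup "loss_category" signal).getD "") == "") ||
    ((List.lookup "semantic_id" signal).isSome && (List.lookup "value" signal).isSome))) = true
instance (semantic_signals : List (String × List (List (String × String)))) (scope : String) : Decidable (Pre_format_loss_context semantic_signals scope) := by unfold Pre_format_loss_context; infer_instance

def pvWitness_format_loss_context : (List (String × List (List (String × String)))) × String :=
  ([("semantic_signals", [[("semantic_id", "s1"), ("value", "low"), ("loss_category", "availability.breakdown")],
                          [("semantic_id", "s2"), ("value", "ok")]])], "line-1")

def Spec_format_loss_context (semantic_signals : List (String × List (List (String × String)))) (scope : String) (out : String) : Prop := out = format_loss_context_alt semantic_signals scope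
instance (semantic_signals : List (String × List (List (String × String)))) (scope : String) (out : String) : Decidable (Spec_format_loss_context semantic_signals scope out) := by unfold Spec_format_loss_context; infer_instance

-- ===== CLAIM (what is proved, stated in full; the proofs are below) =====
def Claim_equal_format_loss_context : Prop := ∀ (semantic_signals : List (String × List (List (String × String)))) (scope : String), Dom_format_loss_context semantic_signals scope → Pre_format_loss_context semantic_signals scope → Spec_format_loss_context semantic_signals scope (format_loss_context semantic_signals scope)

-- ===== LEMMAS AND PROOFS =====

-- proof-local helpers: the per-signal category / record / detail line, and B's loop step
def pvCat (signal : List (String × String)) : String :=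
  (List.lookup "loss_category" signal).getD ""
def pvTrip (signal : List (String × String)) : String × String × String :=
  ((List.lookup "semantic_id" signal).getD "", (List.lookup "value" signal).getD "", (List.lookup "loss_category" signal).getD "")
def pvLine (l : String × String × String) : String :=
  "  - " ++ l.1 ++ ": " ++ l.2.1 ++ " → " ++ l.2.2 ++ "\n"
def pvStepB (st : List String × Int × Int × Int) (signal : List (String × String)) :
    List String × Int × Int × Int :=
  let category := (List.lookup "loss_category" signal).getD ""
  if category == "" then st
  else
    let lines := st.1 ++ ["  - " ++ (List.lookup "semantic_id" signal).getD "" ++ ": " ++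
                          (List.lookup "value" signal).getD "" ++ " → " ++ category ++ "\n"]
    let a := if PySem.Str.startswith category "availability." then st.2.1 + 1 else st.2.1
    let p := if PySem.Str.startswith category "performance." then st.2.2.1 + 1 else st.2.2.1
    let q := if PySem.Str.startswith category "quality." then st.2.2.2 + 1 else st.2.2.2
    (lines, a, p, q)

theorem pvStepB_skip (signal : List (String × String)) (st : List String × Int × Int × Int)
    (h : pvCat signal = "") : pvStepB st signal = st := by
  simp [pvStepB, show (List.lookup "loss_category" signal).getD "" = "" from h]

theorem pvStepB_keep (signal : List (String × String)) (st : List String × Int × Int × Int)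
    (h : ¬ pvCat signal = "") :
    pvStepB st signal = (st.1 ++ [pvLine (pvTrip signal)],
      (if PySem.Str.startswith (pvCat signal) "availability." then st.2.1 + 1 else st.2.1),
      (if PySem.Str.startswith (pvCat signal) "performance." then st.2.2.1 + 1 else st.2.2.1),
      (if PySem.Str.startswith (pvCat signal) "quality." then st.2.2.2 + 1 else st.2.2.2)) := by
  simp only [pvCat] at h
  simp [pvStepB, pvLine, pvTrip, pvCat, h]

theorem cjoin_cons (x : List Char) (xs : List (List Char)) :
    PySem.Chars.join [] (x :: xs) = x ++ PySem.Chars.join [] xs := by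
  cases xs with
  | nil => simp [PySem.Chars.join_singleton, PySem.Chars.join_nil]
  | cons y ys => simp [PySem.Chars.join_cons_cons]

theorem foldl_join {α : Type} (g : α → String) (L : List α) (s : String) :
    L.foldl (fun f l => f ++ g l) s = s ++ PySem.Str.join "" (L.map g) := by
  induction L generalizing s with
  | nil => simp [show PySem.Str.join "" ([] : List String) = "" from rfl, String.append_empty]
  | cons x xs ih => rw [List.foldl_cons, ih, ← String.toList_inj]; simp [cjoin_cons, String.append_assoc]

theorem bfold (sigs : List (List (String × String))) (ls : List String) (a p q : Int) :
    sigs.foldl pvStepB (ls, a, p, q)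
    = (ls ++ (sigs.filter (fun s => pvCat s != "")).map (fun s => pvLine (pvTrip s)),
       a + (((sigs.filter (fun s => pvCat s != "")).countP (fun s => PySem.Str.startswith (pvCat s) "availability.") : Nat) : Int),
       p + (((sigs.filter (fun s => pvCat s != "")).countP (fun s => PySem.Str.startswith (pvCat s) "performance.") : Nat) : Int),
       q + (((sigs.filter (fun s => pvCat s != "")).countP (fun s => PySem.Str.startswith (pvCat s) "quality.") : Nat) : Int)) := by
  induction sigs generalizing ls a p q with
  | nil => simp
  | cons s rest ih =>
    rw [List.foldl_cons]
    by_cases h : pvCat s = ""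
    · rw [pvStepB_skip s _ h, ih]
      have hf : (pvCat s != "") = false := by simp [h]
      simp [hf]
    · rw [pvStepB_keep s _ h, ih]
      have hf : (pvCat s != "") = true := by simp [h]
      simp only [List.filter_cons, hf, if_true, List.countP_cons, List.map_cons, Prod.mk.injEq]
      refine ⟨by simp [List.append_assoc], ?_, ?_, ?_⟩ <;>
        · split_ifs <;> push_cast <;> ring

-- ===== VERDICT (by name: the statement is the Claim_ definition above) =====
theorem format_loss_context_spec : Claim_equal_format_loss_context := by
  intro ss scope _ _
  unfold Spec_format_loss_context format_loss_context format_loss_context_alt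
  by_cases h0 : (ss.isEmpty || ((List.lookup "semantic_signals" ss).getD []).isEmpty) = true
  · rw [if_pos h0, if_pos h0]
  · rw [if_neg h0, if_neg h0]
    have hB : (fun (st : List String × Int × Int × Int) signal =>
        let category := (List.lookup "loss_category" signal).getD ""
        if category == "" then st
        else
          let lines := st.1 ++ ["  - " ++ (List.lookup "semantic_id" signal).getD "" ++ ": " ++
                                (List.lookup "value" signal).getD "" ++ " → " ++ category ++ "\n"]
          let a := if PySem.Str.startswith category "availability." then st.2.1 + 1 else st.2.1
          let p := if PySem.Str.startswith category "performance." then st.2.2.1 + 1 else st.2.2.1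
          let q := if PySem.Str.startswith category "quality." then st.2.2.2 + 1 else st.2.2.2
          (lines, a, p, q)) = pvStepB := rfl
    simp only [hB, bfold, pvCat, PySem.List.foldl_append_if, List.nil_append, zero_add]
    set Lf := List.filter (fun s => (List.lookup "loss_category" s).getD "" != "") ((List.lookup "semantic_signals" ss).getD []) with hLf
    have hA : (fun x : List (String × String) => ((List.lookup "semantic_id" x).getD "", (List.lookup "value" x).getD "", (List.lookup "loss_category" x).getD "")) = pvTrip := rfl
    have hg : ((fun l : String × String × String => "  - " ++ l.1 ++ ": " ++ l.2.1 ++ " → " ++ l.2.2 ++ "\n") ∘ pvTrip) = (fun s => pvLine (pvTrip s)) := rfl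
    have hpa : ((fun l : String × String × String => PySem.Str.startswith l.2.2 "availability.") ∘ pvTrip) = (fun s : List (String × String) => PySem.Str.startswith ((List.lookup "loss_category" s).getD "") "availability.") := rfl
    have hpp : ((fun l : String × String × String => PySem.Str.startswith l.2.2 "performance.") ∘ pvTrip) = (fun s : List (String × String) => PySem.Str.startswith ((List.lookup "loss_category" s).getD "") "performance.") := rfl
    have hpq : ((fun l : String × String × String => PySem.Str.startswith l.2.2 "quality.") ∘ pvTrip) = (fun s : List (String × String) => PySem.Str.startswith ((List.lookup "loss_category" s).getD "") "quality.") := rfl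
    simp only [hA, foldl_join, List.map_map, List.filter_map, List.isEmpty_map, List.length_map, hg, hpa, hpp, hpq]
    have hcond : ∀ (l : List (List (String × String))),
        (((l.length : Nat) : Int) != 0) = !l.isEmpty := by
      intro l
      rcases l with _ | ⟨x, xs⟩ <;> simp <;> omega
    simp only [List.countP_eq_length_filter, hcond]
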